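-- pv_equiv track=rewrite | github.com/meet0208/pythoncodes | b84.py | check
-- ===== SOURCE A (Python) =====
-- def check(a):
--     ctr=0
--     sum=0
--     for i in a:
--         if i<0:
--             ctr+=1
--         else:
--             sum+=i
--     return [ctr,sum]
-- ===== SOURCE B (Python) =====
-- def check(a):
--     ctr = sum(1 for i in a if i < 0)
--     total = sum(i for i in a if i >= 0)
--     return [ctr, total]
-- ===== Notes on version B (the rewrite author's own statement) =====
-- stated objective: idiomatic
-- what changed: Replaces the single fused loop with two accumulators by two independent filtered sums: a count of the negatives and a sum of the non-negatives.
import Mathlib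
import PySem

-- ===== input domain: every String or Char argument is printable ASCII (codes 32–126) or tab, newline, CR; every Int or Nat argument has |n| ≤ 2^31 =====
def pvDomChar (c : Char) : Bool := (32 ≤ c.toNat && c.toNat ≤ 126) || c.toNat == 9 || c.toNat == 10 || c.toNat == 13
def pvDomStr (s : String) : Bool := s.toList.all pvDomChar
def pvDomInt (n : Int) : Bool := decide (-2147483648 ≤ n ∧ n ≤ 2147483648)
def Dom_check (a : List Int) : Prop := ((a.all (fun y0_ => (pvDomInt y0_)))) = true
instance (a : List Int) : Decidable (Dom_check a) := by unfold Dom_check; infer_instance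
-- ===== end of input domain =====

-- B replaces the fused single loop (two accumulators) by two independent filtered passes; same values.

-- ===== PORT A =====
-- one loop, two accumulators (ctr, sum), as in the Python
def check (a : List Int) : List Int :=
  let st := a.foldl (fun (st : Int × Int) i =>
    if i < 0 then (st.1 + 1, st.2) else (st.1, st.2 + i)) (0, 0)
  [st.1, st.2]

-- ===== PORT B =====
-- two passes: count negatives, then sum the non-negatives
def check_alt (a : List Int) : List Int :=
  let ctr : Int := ((a.filter (fun i => i < 0)).length : Int)
  let total : Int := (a.filter (fun i => 0 ≤ i)).sum
  [ctr, total]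

-- ===== PRECONDITION & SPEC =====
def Spec_check (a : List Int) (out : List Int) : Prop := out = check_alt a
instance (a : List Int) (out : List Int) : Decidable (Spec_check a out) := by unfold Spec_check; infer_instance

-- ===== CLAIM (what is proved, stated in full; the proofs are below) =====
def Claim_equal_check : Prop := ∀ (a : List Int), Dom_check a → Spec_check a (check a)

-- ===== LEMMAS AND PROOFS =====
lemma check_fold_inv (a : List Int) (c s : Int) :
    a.foldl (fun (st : Int × Int) i =>
      if i < 0 then (st.1 + 1, st.2) else (st.1, st.2 + i)) (c, s)
    = (c + ((a.filter (fun i => i < 0)).length : Int),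
       s + (a.filter (fun i => 0 ≤ i)).sum) := by
  induction a generalizing c s with
  | nil => simp
  | cons x xs ih =>
    by_cases hx : x < 0
    · simp [List.foldl, hx, ih, not_le.mpr hx]
      push_cast
      ring
    · simp [List.foldl, hx, ih, not_lt.mp hx]
      ring

-- ===== VERDICT (by name: the statement is the Claim_ definition above) =====
theorem check_spec : Claim_equal_check := by
  intro a _
  unfold Spec_check check check_alt
  simp [check_fold_inv]
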